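-- pv_equiv track=rewrite | github.com/pricekid/CalmMindAI | emergency_only.py | format_content
-- ===== SOURCE A (Python) =====
-- def format_content(text):
--     """Format text content with HTML paragraphs."""
--     if not text:
--         return ""
--     paragraphs = text.split('\n\n')
--     result = ""
--     for p in paragraphs:
--         p_with_breaks = p.replace('\n', '<br>')
--         result += f'<p>{p_with_breaks}</p>'
--     return result
-- ===== SOURCE B (Python) =====
-- def format_content(text):
--     """Format text content with HTML paragraphs."""
--     if not text:
--         return ""
--     return '<p>' + text.replace('\n\n', '</p><p>').replace('\n', '<br>') + '</p>'
-- ===== Notes on version B (the rewrite author's own statement) =====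
-- stated objective: simpler
-- what changed: Replaces the split-into-paragraphs list plus accumulation loop with two whole-string substitutions (double newline to the closing-plus-opening paragraph tag first, then single newline to the br tag) and a single outer paragraph-tag wrap.
import Mathlib
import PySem

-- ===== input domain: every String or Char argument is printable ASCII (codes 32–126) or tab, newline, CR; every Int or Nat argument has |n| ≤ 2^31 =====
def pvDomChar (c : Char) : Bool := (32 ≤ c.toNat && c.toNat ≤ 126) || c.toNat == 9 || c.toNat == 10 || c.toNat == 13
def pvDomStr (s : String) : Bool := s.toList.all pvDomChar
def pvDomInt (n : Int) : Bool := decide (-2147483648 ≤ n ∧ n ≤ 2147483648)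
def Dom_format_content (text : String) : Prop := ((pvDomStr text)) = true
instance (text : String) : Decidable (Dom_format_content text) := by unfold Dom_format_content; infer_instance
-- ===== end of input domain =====

-- B replaces A's split-into-paragraphs + accumulation loop by two whole-string substitutions
-- ('\n\n' → '</p><p>' first, then '\n' → '<br>') wrapped once in '<p>…</p>' (objective: simpler).

-- ===== PORT A =====
-- the 'for p in paragraphs' loop, with 'result' as the fold accumulator
def formatLoopA (paragraphs : List (List Char)) : List Char :=
  paragraphs.foldl (fun result p =>
    result ++ ("<p>".toList ++ PySem.Chars.replace p ['\n'] "<br>".toList ++ "</p>".toList)) []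

def format_content (text : String) : String :=
  if text.toList = [] then "" else
    String.ofList (formatLoopA (PySem.Chars.splitOn text.toList ['\n', '\n']))

-- ===== PORT B =====
def format_content_alt (text : String) : String :=
  if text.toList = [] then "" else
    String.ofList ("<p>".toList ++
      PySem.Chars.replace (PySem.Chars.replace text.toList ['\n', '\n'] "</p><p>".toList)
        ['\n'] "<br>".toList ++ "</p>".toList)

-- ===== PRECONDITION & SPEC =====
def Spec_format_content (text : String) (out : String) : Prop := out = format_content_alt text
instance (text : String) (out : String) : Decidable (Spec_format_content text out) := by unfold Spec_format_content; infer_instance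

-- ===== CLAIM (what is proved, stated in full; the proofs are below) =====
def Claim_equal_format_content : Prop := ∀ (text : String), Dom_format_content text → Spec_format_content text (format_content text)

-- ===== LEMMAS AND PROOFS =====

-- replacing a single-character pattern is a flatMap over the characters
theorem replace_go_single (c : Char) (new : List Char) :
    ∀ (fuel : Nat) (l acc : List Char), l.length ≤ fuel →
      PySem.Chars.replace.go [c] new fuel l acc =
        acc.reverse ++ l.flatMap (fun d => if d = c then new else [d]) := by
  intro fuel
  induction fuel with
  | zero => intro l acc h
            have : l = [] := by cases l <;> simp_all
            subst this; simp [PySem.Chars.replace.go]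
  | succ f ih =>
      intro l acc h
      cases l with
      | nil => simp [PySem.Chars.replace.go]
      | cons d t =>
          simp only [PySem.Chars.replace.go]
          by_cases hd : d = c
          · subst hd
            have hpre : List.isPrefixOf [d] (d :: t) = true := by simp [List.isPrefixOf]
            rw [if_pos hpre]
            rw [ih _ _ (by simpa using Nat.le_of_succ_le_succ h)]
            simp
          · have hpre : List.isPrefixOf [c] (d :: t) = false := by
              simp [List.isPrefixOf]
              exact fun hcd => (hd hcd.symm).elim
            rw [if_neg (by simp [hpre])]
            rw [ih _ _ (by simpa using Nat.le_of_succ_le_succ h)]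
            simp [hd]

theorem replace_single_eq_flatMap (c : Char) (new l : List Char) :
    PySem.Chars.replace l [c] new =
      l.flatMap (fun d => if d = c then new else [d]) := by
  simp only [PySem.Chars.replace, List.isEmpty_cons, Bool.false_eq_true, if_false]
  simpa using replace_go_single c new l.length l [] le_rfl

-- helper for splitOn.go accumulator facts: fuse a pending current chunk onto the head
def consHead (x : List Char) : List (List Char) → List (List Char)
  | [] => [x]
  | h :: t => (x ++ h) :: t

theorem splitOn_go_out (sep : List Char) :
    ∀ (fuel : Nat) (l cur : List Char) (accs : List (List Char)),
      PySem.Chars.splitOn.go sep fuel l cur accs =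
        accs.reverse ++ consHead cur.reverse (PySem.Chars.splitOn.go sep fuel l [] []) := by
  intro fuel
  induction fuel with
  | zero => intro l cur accs; simp [PySem.Chars.splitOn.go, consHead]
  | succ f ih =>
      intro l cur accs
      cases l with
      | nil => simp [PySem.Chars.splitOn.go, consHead]
      | cons d t =>
          simp only [PySem.Chars.splitOn.go]
          by_cases hp : List.isPrefixOf sep (d :: t) = true
          · rw [if_pos hp, if_pos hp]
            rw [ih _ [] (cur.reverse :: accs), ih _ [] ([([] : List Char).reverse])]
            simp [consHead]
          · rw [if_neg hp, if_neg hp]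
            rw [ih t (d :: cur) accs, ih t [d] []]
            cases h : PySem.Chars.splitOn.go sep f t [] [] with
            | nil => simp [consHead]
            | cons a b => simp [consHead]

theorem splitOn_go_ne_nil (sep : List Char) (fuel : Nat) (l cur : List Char) (accs : List (List Char)) :
    PySem.Chars.splitOn.go sep fuel l cur accs ≠ [] := by
  induction fuel generalizing l cur accs with
  | zero => simp [PySem.Chars.splitOn.go]
  | succ f ih =>
      cases l with
      | nil => simp [PySem.Chars.splitOn.go]
      | cons d t =>
          simp only [PySem.Chars.splitOn.go]
          split
          · exact ih _ _ _
          · exact ih _ _ _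

theorem splitOn_ne_nil (s sep : List Char) : PySem.Chars.splitOn s sep ≠ [] := by
  simp only [PySem.Chars.splitOn]
  exact splitOn_go_ne_nil _ _ _ _ _

theorem replace_go_out (old new : List Char) :
    ∀ (fuel : Nat) (l acc : List Char),
      PySem.Chars.replace.go old new fuel l acc =
        acc.reverse ++ PySem.Chars.replace.go old new fuel l [] := by
  intro fuel
  induction fuel with
  | zero => intro l acc; simp [PySem.Chars.replace.go]
  | succ f ih =>
      intro l acc
      cases l with
      | nil => simp [PySem.Chars.replace.go]
      | cons d t =>
          simp only [PySem.Chars.replace.go]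
          by_cases hp : List.isPrefixOf old (d :: t) = true
          · rw [if_pos hp, if_pos hp, ih _ (new.reverse ++ acc), ih _ (new.reverse ++ [])]
            simp
          · rw [if_neg hp, if_neg hp, ih t (d :: acc), ih t [d]]
            simp

-- replacing a (nonempty) pattern is: split on it, join with the replacement
theorem replace_go_eq_join_splitOn_go (old new : List Char) (hold : 1 ≤ old.length) :
    ∀ (f₁ : Nat) (f₂ : Nat) (l : List Char), l.length ≤ f₁ → l.length ≤ f₂ →
      PySem.Chars.replace.go old new f₁ l [] =
        PySem.Chars.join new (PySem.Chars.splitOn.go old f₂ l [] []) := by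
  intro f₁
  induction f₁ with
  | zero => intro f₂ l h1 h2
            have : l = [] := by cases l <;> simp_all
            subst this
            cases f₂ <;> simp [PySem.Chars.replace.go, PySem.Chars.splitOn.go,
              PySem.Chars.join, List.intercalate]
  | succ f ih =>
      intro f₂ l h1 h2
      cases l with
      | nil => cases f₂ <;> simp [PySem.Chars.replace.go, PySem.Chars.splitOn.go,
                 PySem.Chars.join, List.intercalate]
      | cons d t =>
          obtain ⟨g, rfl⟩ : ∃ g, f₂ = g + 1 := ⟨f₂ - 1, by simp only [List.length_cons] at h2; omega⟩
          simp only [PySem.Chars.replace.go, PySem.Chars.splitOn.go]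
          by_cases hp : List.isPrefixOf old (d :: t) = true
          · rw [if_pos hp, if_pos hp]
            rw [replace_go_out old new f _ (new.reverse ++ [])]
            rw [ih g (List.drop old.length (d :: t))
                  (by rw [List.length_drop]; simp only [List.length_cons] at h1 ⊢; omega)
                  (by rw [List.length_drop]; simp only [List.length_cons] at h2 ⊢; omega)]
            rw [splitOn_go_out old g _ [] [[].reverse]]
            cases h : PySem.Chars.splitOn.go old g (List.drop old.length (d :: t)) [] [] with
            | nil => exact absurd h (splitOn_go_ne_nil _ _ _ _ _)
            | cons a b =>
                simp [consHead, PySem.Chars.join_cons_cons]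
          · rw [if_neg hp, if_neg hp]
            rw [replace_go_out old new f t [d]]
            rw [ih g t (by simp only [List.length_cons] at h1; omega) (by simp only [List.length_cons] at h2; omega)]
            rw [splitOn_go_out old g t [d] []]
            cases h : PySem.Chars.splitOn.go old g t [] [] with
            | nil => exact absurd h (splitOn_go_ne_nil _ _ _ _ _)
            | cons a b =>
                cases b with
                | nil => simp [consHead, PySem.Chars.join_singleton]
                | cons b2 bt => simp [consHead, PySem.Chars.join_cons_cons]

theorem replace_eq_join_splitOn (s old new : List Char) (hold : 1 ≤ old.length) :
    PySem.Chars.replace s old new = PySem.Chars.join new (PySem.Chars.splitOn s old) := by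
  have hne : old.isEmpty = false := by cases old <;> simp_all
  simp only [PySem.Chars.replace, PySem.Chars.splitOn, hne, Bool.false_eq_true, if_false]
  exact replace_go_eq_join_splitOn_go old new hold s.length (s.length + 1) s le_rfl (by omega)

-- abbreviation used only in the proofs: the '\n' → '<br>' substitution
def repBr (l : List Char) : List Char := PySem.Chars.replace l ['\n'] "<br>".toList

theorem repBr_append (x y : List Char) : repBr (x ++ y) = repBr x ++ repBr y := by
  simp [repBr, replace_single_eq_flatMap]

theorem repBr_sep : repBr "</p><p>".toList = "</p><p>".toList := by
  simp [repBr, replace_single_eq_flatMap]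

-- repBr distributes over joining with the newline-free separator
theorem repBr_join (ps : List (List Char)) :
    repBr (PySem.Chars.join "</p><p>".toList ps) =
      PySem.Chars.join "</p><p>".toList (ps.map repBr) := by
  induction ps with
  | nil => simp [PySem.Chars.join_nil, repBr, replace_single_eq_flatMap]
  | cons p rest ih =>
      cases rest with
      | nil => simp [PySem.Chars.join_singleton]
      | cons q qs =>
          rw [PySem.Chars.join_cons_cons, repBr_append, repBr_append, repBr_sep, ih]
          simp [PySem.Chars.join_cons_cons]

-- A's loop is a flatMap of the per-paragraph wrapper
theorem formatLoopA_eq_flatMap (ps : List (List Char)) :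
    formatLoopA ps =
      ps.flatMap (fun p => "<p>".toList ++ repBr p ++ "</p>".toList) := by
  have h : ∀ (l : List (List Char)) (acc : List Char),
      l.foldl (fun result p =>
        result ++ ("<p>".toList ++ PySem.Chars.replace p ['\n'] "<br>".toList ++ "</p>".toList)) acc =
      acc ++ l.flatMap (fun p => "<p>".toList ++ repBr p ++ "</p>".toList) := by
    intro l
    induction l with
    | nil => simp
    | cons p rest ih =>
        intro acc
        rw [List.foldl_cons, ih, List.flatMap_cons]
        simp [repBr, List.append_assoc]
  rw [formatLoopA, h ps []]
  simp

-- concatenating the wrapped paragraphs = one wrap around the separator-joined paragraphs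
theorem flatMap_wrap_eq (ps : List (List Char)) (hps : ps ≠ []) :
    ps.flatMap (fun p => "<p>".toList ++ repBr p ++ "</p>".toList) =
      "<p>".toList ++ PySem.Chars.join "</p><p>".toList (ps.map repBr) ++ "</p>".toList := by
  induction ps with
  | nil => exact absurd rfl hps
  | cons p rest ih =>
      cases rest with
      | nil => simp [PySem.Chars.join_singleton]
      | cons q qs =>
          have hlit : "</p><p>".toList = "</p>".toList ++ "<p>".toList := rfl
          rw [List.flatMap_cons, ih (by simp)]
          simp only [List.map_cons]
          rw [PySem.Chars.join_cons_cons, hlit]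
          simp [List.append_assoc]

-- ===== VERDICT (by name: the statement is the Claim_ definition above) =====
theorem format_content_spec : Claim_equal_format_content := by
  intro text _
  unfold Spec_format_content format_content format_content_alt
  by_cases h : text.toList = []
  · simp [h]
  · rw [if_neg h, if_neg h]
    congr 1
    rw [formatLoopA_eq_flatMap,
      flatMap_wrap_eq _ (splitOn_ne_nil text.toList ['\n', '\n']),
      replace_eq_join_splitOn text.toList ['\n', '\n'] "</p><p>".toList (by simp)]
    have : PySem.Chars.replace
        (PySem.Chars.join "</p><p>".toList (PySem.Chars.splitOn text.toList ['\n', '\n']))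
        ['\n'] "<br>".toList =
      PySem.Chars.join "</p><p>".toList
        ((PySem.Chars.splitOn text.toList ['\n', '\n']).map repBr) := repBr_join _
    rw [this]
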